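-- pv_equiv track=rewrite | github.com/amir-daneshmand/Codes | Amir39_TargetSum_Tabulated.py | count_construct_tabulated
-- ===== SOURCE A (Python) =====
-- def count_construct_tabulated(target_word, word_bank):
--     table = [0]*(len(target_word)+1)
--     table[0] = 1
--
--     for i in range(len(table)):
--         if table[i] != 0:
--             suffix = target_word[i:]
--             for word in word_bank:
--                 try:
--                     idx = suffix.index(word)
--                 except:
--                     idx = None
--                 if idx == 0:
--                     table[i+len(word)] += table[i]
--     return table
-- ===== SOURCE B (Python) =====
-- def count_construct_tabulated(target_word, word_bank):
--     n = len(target_word)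
--     # Index phase: for every position of the target, the lengths of the bank
--     # words that occur there, found with find() instead of rescanning suffixes.
--     matches = [[] for _ in range(n + 1)]
--     for w in word_bank:
--         p = target_word.find(w)
--         while p != -1:
--             matches[p].append(len(w))
--             p = target_word.find(w, p + 1)
--     # Push phase: plain prefix-count DP over the index.
--     table = [0] * (n + 1)
--     table[0] = 1
--     for i in range(n + 1):
--         for lw in matches[i]:
--             table[i + lw] += table[i]
--     return table
-- ===== Notes on version B (the rewrite author's own statement) =====
-- stated objective: faster
-- what changed: A scans the bank at every table position and substring-searches the whole remaining suffix per word with suffix.index(word); B first builds an occurrence index (per target position, the lengths of the bank words occurring there, via repeated str.find), then runs a plain push DP over that index, so the per-position word scan with its suffix search disappears.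
import Mathlib
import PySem

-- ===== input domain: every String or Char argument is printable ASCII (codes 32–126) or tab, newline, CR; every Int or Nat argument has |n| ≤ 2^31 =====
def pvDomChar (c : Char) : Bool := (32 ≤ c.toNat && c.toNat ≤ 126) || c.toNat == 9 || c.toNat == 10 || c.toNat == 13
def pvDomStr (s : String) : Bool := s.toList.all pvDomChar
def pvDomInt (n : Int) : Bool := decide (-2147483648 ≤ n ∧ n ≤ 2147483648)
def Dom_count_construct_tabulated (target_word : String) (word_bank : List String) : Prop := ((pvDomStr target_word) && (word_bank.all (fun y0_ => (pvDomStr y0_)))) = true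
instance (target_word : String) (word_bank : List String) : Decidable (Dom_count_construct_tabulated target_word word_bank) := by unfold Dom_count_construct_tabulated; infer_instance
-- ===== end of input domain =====

-- B replaces A's per-position scan of the bank (a full substring search of the remaining
-- suffix per word via suffix.index) by an occurrence index built once with str.find,
-- followed by a plain push DP over that index.

-- ===== PORT A =====
-- inner loop body: 'for word in word_bank: try idx = suffix.index(word) except: idx = None; if idx == 0: …'
def pvInnerA (t : List Char) (i : Nat) (tb2 : List Int) (word : String) : List Int :=
  let j := PySem.Chars.find (t.drop i) word.toList   -- suffix = target_word[i:] (slice with 0 ≤ i)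
  let idx : Option Int := if j = -1 then none else some j   -- s.index = s.find, ValueError (→ none) iff -1
  if idx = some 0 then
    tb2.set (i + word.length) ((tb2.getD (i + word.length) 0) + tb2.getD i 0)
  else tb2

-- outer loop body: 'if table[i] != 0: …'
def pvStepA (t : List Char) (bank : List String) (tb : List Int) (i : Nat) : List Int :=
  if tb.getD i 0 ≠ 0 then bank.foldl (pvInnerA t i) tb else tb

def count_construct_tabulated (target_word : String) (word_bank : List String) : List Int :=
  let t := target_word.toList
  let table : List Int := (List.replicate (t.length + 1) 0).set 0 1   -- table = [0]*(len+1); table[0] = 1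
  (List.range table.length).foldl (pvStepA t word_bank) table          -- for i in range(len(table)): …

-- ===== PORT B =====
-- 'p = target_word.find(w); while p != -1: matches[p].append(len(w)); p = target_word.find(w, p+1)'
-- collected as the list of occurrence positions of w from start p.  The fuel and the
-- 'p ≤ t.length' test only make the loop total: Python's find past len(t) returns -1,
-- and positions strictly increase, so neither cuts the loop short (pvCollect_eq below).
def pvCollectGo (t w : List Char) : Nat → Nat → List Nat
  | 0, _ => []
  | fuel + 1, p =>
      if p ≤ t.length then
        let q := PySem.Chars.findFrom t w (p : Int) none
        if q = -1 then []
        else q.toNat :: pvCollectGo t w fuel (q.toNat + 1)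
      else []

def pvCollect (t w : List Char) (p : Nat) : List Nat :=
  pvCollectGo t w (t.length + 1 - p) p

-- matches[p].append(len(w))
def pvAppendAt (m : List (List Nat)) (p : Nat) (lw : Nat) : List (List Nat) :=
  m.set p (m.getD p [] ++ [lw])

-- the index phase: matches = [[] for _ in range(n+1)]; for w in word_bank: …
def pvBuild (t : List Char) (bank : List String) : List (List Nat) :=
  bank.foldl
    (fun m w => (pvCollect t w.toList 0).foldl (fun m' p => pvAppendAt m' p w.length) m)
    (List.replicate (t.length + 1) [])

-- 'table[i + lw] += table[i]'
def pvPushB (i : Nat) (tb : List Int) (lw : Nat) : List Int :=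
  tb.set (i + lw) ((tb.getD (i + lw) 0) + tb.getD i 0)

def count_construct_tabulated_alt (target_word : String) (word_bank : List String) : List Int :=
  let t := target_word.toList
  let m := pvBuild t word_bank
  let table : List Int := (List.replicate (t.length + 1) 0).set 0 1   -- table = [0]*(n+1); table[0] = 1
  (List.range (t.length + 1)).foldl (fun tb i => (m.getD i []).foldl (pvPushB i) tb) table

-- ===== PRECONDITION & SPEC =====
def Spec_count_construct_tabulated (target_word : String) (word_bank : List String) (out : List Int) : Prop := out = count_construct_tabulated_alt target_word word_bank
instance (target_word : String) (word_bank : List String) (out : List Int) : Decidable (Spec_count_construct_tabulated target_word word_bank out) := by unfold Spec_count_construct_tabulated; infer_instance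

-- ===== CLAIM (what is proved, stated in full; the proofs are below) =====
def Claim_equal_count_construct_tabulated : Prop := ∀ (target_word : String) (word_bank : List String), Dom_count_construct_tabulated target_word word_bank → Spec_count_construct_tabulated target_word word_bank (count_construct_tabulated target_word word_bank)

-- ===== LEMMAS AND PROOFS =====

-- prefix at a later position is an infix of an earlier drop
lemma pv_prefix_drop_infix (t w : List Char) (p q : Nat) (hpq : p ≤ q)
    (h : w <+: t.drop q) : w <:+: t.drop p := by
  have hsuf : t.drop q <:+ t.drop p := by
    have hd : t.drop q = (t.drop p).drop (q - p) := by
      rw [List.drop_drop]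
      congr 1
      omega
    rw [hd]
    exact List.drop_suffix _ _
  obtain ⟨v, hv⟩ := h
  obtain ⟨u, hu⟩ := hsuf
  exact ⟨u, v, by rw [← hu, ← hv]; simp⟩

-- pvCollect enumerates exactly the occurrence positions from p on
lemma pvCollectGo_eq (t w : List Char) :
    ∀ (fuel p : Nat), t.length + 1 - p ≤ fuel →
      pvCollectGo t w fuel p
        = (List.range' p (t.length + 1 - p)).filter (fun q => decide (w <+: t.drop q)) := by
  intro fuel
  induction fuel with
  | zero =>
    intro p hf
    have h0 : t.length + 1 - p = 0 := by omega
    rw [h0]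
    simp [pvCollectGo]
  | succ fuel ih =>
    intro p hf
    rw [pvCollectGo]
    by_cases hp : p ≤ t.length
    · rw [if_pos hp]
      by_cases hq : PySem.Chars.findFrom t w (p : Int) none = -1
      · simp only [if_pos hq]
        symm
        apply List.filter_eq_nil_iff.mpr
        intro i hi
        rw [List.mem_range'_1] at hi
        simp only [decide_eq_true_eq]
        intro hpre
        exact (PySem.Chars.findFrom_natCast_eq_neg_one_iff t w p hp).mp hq
          (pv_prefix_drop_infix t w p i hi.1 hpre)
      · simp only [if_neg hq]
        have hspec := PySem.Chars.findFrom_natCast_spec t w p hp hq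
        set qn := (PySem.Chars.findFrom t w (p : Int) none).toNat with hqn
        have hpq : p ≤ qn := by
          have h1 := hspec.1
          omega
        have hle : qn ≤ t.length := by
          by_cases hw : w = []
          · subst hw
            have hqp : PySem.Chars.findFrom t [] (p : Int) none = (p : Int) := by
              rw [PySem.Chars.findFrom_natCast t [] p hp]
              simp [PySem.Chars.find_nil]
            omega
          · have hpre := hspec.2.1
            have h1 : 0 < w.length := List.length_pos_iff.mpr hw
            have h2 := hpre.length_le
            rw [List.length_drop] at h2
            omega
        rw [ih (qn + 1) (by omega)]
        have hsplit : t.length + 1 - p = (qn - p) + (1 + (t.length + 1 - (qn + 1))) := by omega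
        rw [hsplit, ← List.range'_append_1, ← List.range'_append_1,
          List.filter_append, List.filter_append]
        have h1 : (List.range' p (qn - p)).filter (fun i => decide (w <+: t.drop i)) = [] := by
          apply List.filter_eq_nil_iff.mpr
          intro i hi
          rw [List.mem_range'_1] at hi
          simp only [decide_eq_true_eq]
          exact hspec.2.2 i hi.1 (by omega)
        have h2 : (List.range' (p + (qn - p)) 1).filter (fun i => decide (w <+: t.drop i))
            = [qn] := by
          have hx2 : p + (qn - p) = qn := by omega
          rw [hx2]
          simp [hspec.2.1]
        rw [h1, h2]
        have h3 : p + (qn - p) + 1 = qn + 1 := by omega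
        rw [h3]
        simp
    · rw [if_neg hp]
      have h0 : t.length + 1 - p = 0 := by omega
      rw [h0]
      simp

lemma pvCollect_eq (t w : List Char) (p : Nat) :
    pvCollect t w p
      = (List.range' p (t.length + 1 - p)).filter (fun q => decide (w <+: t.drop q)) := by
  unfold pvCollect
  exact pvCollectGo_eq t w (t.length + 1 - p) p (le_refl _)

lemma pvCollect_mem (t w : List Char) (i : Nat) :
    i ∈ pvCollect t w 0 ↔ (i ≤ t.length ∧ w <+: t.drop i) := by
  rw [pvCollect_eq t w 0, List.mem_filter]
  simp only [List.mem_range'_1, decide_eq_true_eq]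
  constructor
  · rintro ⟨h1, h2⟩
    exact ⟨by omega, h2⟩
  · rintro ⟨h1, h2⟩
    exact ⟨⟨by omega, by omega⟩, h2⟩

lemma pvCollect_nodup (t w : List Char) : (pvCollect t w 0).Nodup := by
  rw [pvCollect_eq t w 0]
  exact (List.nodup_range' ..).filter _

-- appending at distinct positions, read back pointwise
lemma pv_append_fold (lw : Nat) (ps : List Nat) (hnd : ps.Nodup) :
    ∀ (m : List (List Nat)),
      (ps.foldl (fun m' p => pvAppendAt m' p lw) m).length = m.length ∧
      ∀ i, i < m.length →
        (ps.foldl (fun m' p => pvAppendAt m' p lw) m).getD i []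
          = m.getD i [] ++ (if i ∈ ps then [lw] else []) := by
  induction ps with
  | nil => intro m; exact ⟨rfl, fun i _ => by simp⟩
  | cons p rest ih =>
    intro m
    rw [List.foldl_cons]
    obtain ⟨L1, L2⟩ := ih hnd.of_cons (pvAppendAt m p lw)
    have hlen : (pvAppendAt m p lw).length = m.length := by
      simp [pvAppendAt]
    refine ⟨by rw [L1, hlen], fun i hi => ?_⟩
    rw [L2 i (by omega)]
    by_cases hip : i = p
    · subst hip
      have hnm : i ∉ rest := (List.nodup_cons.mp hnd).1
      rw [if_neg hnm, if_pos (List.mem_cons_self ..)]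
      simp only [pvAppendAt]
      rw [List.getD_eq_getElem?_getD, List.getElem?_set_self hi, Option.getD_some]
      simp
    · have : (pvAppendAt m p lw).getD i [] = m.getD i [] := by
        simp only [pvAppendAt]
        rw [List.getD_eq_getElem?_getD, List.getElem?_set_ne (fun h => hip h.symm),
          ← List.getD_eq_getElem?_getD]
      rw [this]
      by_cases hr : i ∈ rest
      · rw [if_pos hr, if_pos (List.mem_cons_of_mem _ hr)]
      · rw [if_neg hr, if_neg (by
          intro hc
          rcases List.mem_cons.mp hc with h | h
          · exact hip h
          · exact hr h)]

-- the built index read at position i ≤ n: the lengths of the bank words occurring there, in bank order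
lemma pvBuild_getD (t : List Char) (bank : List String) :
    (pvBuild t bank).length = t.length + 1 ∧
    ∀ i, i ≤ t.length →
      (pvBuild t bank).getD i []
        = (bank.filter (fun w => decide (w.toList <+: t.drop i))).map String.length := by
  unfold pvBuild
  suffices h : ∀ (m : List (List Nat)), m.length = t.length + 1 →
      (bank.foldl (fun m w => (pvCollect t w.toList 0).foldl (fun m' p => pvAppendAt m' p w.length) m) m).length = t.length + 1 ∧
      ∀ i, i ≤ t.length →
        (bank.foldl (fun m w => (pvCollect t w.toList 0).foldl (fun m' p => pvAppendAt m' p w.length) m) m).getD i []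
          = m.getD i [] ++ (bank.filter (fun w => decide (w.toList <+: t.drop i))).map String.length by
    obtain ⟨h1, h2⟩ := h (List.replicate (t.length + 1) []) (by simp)
    refine ⟨h1, fun i hi => ?_⟩
    rw [h2 i hi, List.getD_eq_getElem?_getD, List.getElem?_replicate, if_pos (by omega)]
    simp
  induction bank with
  | nil => intro m hm; exact ⟨hm, fun i _ => by simp⟩
  | cons w rest ih =>
    intro m hm
    rw [List.foldl_cons]
    obtain ⟨A1, A2⟩ := pv_append_fold w.length (pvCollect t w.toList 0) (pvCollect_nodup t w.toList) m
    obtain ⟨B1, B2⟩ := ih _ (by rw [A1, hm])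
    refine ⟨B1, fun i hi => ?_⟩
    rw [B2 i hi, A2 i (by omega)]
    by_cases hpre : w.toList <+: t.drop i
    · rw [if_pos ((pvCollect_mem t w.toList i).mpr ⟨hi, hpre⟩)]
      simp [hpre]
    · rw [if_neg (fun hc => hpre ((pvCollect_mem t w.toList i).mp hc).2)]
      simp [hpre]

-- 'suffix.index(word) == 0' ⟺ word is a prefix of the suffix
lemma pv_find_zero_iff (s sub : List Char) :
    ((if PySem.Chars.find s sub = -1 then (none : Option Int)
      else some (PySem.Chars.find s sub)) = some 0) ↔ sub <+: s := by
  have h0 : PySem.Chars.findFrom s sub ((0:Nat):Int) = PySem.Chars.find s sub := by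
    simp [PySem.Chars.findFrom_zero s sub]
  constructor
  · intro h
    by_cases hne : PySem.Chars.find s sub = -1
    · simp [hne] at h
    · rw [if_neg hne] at h
      have hfind : PySem.Chars.find s sub = 0 := Option.some.inj h
      have hspec := PySem.Chars.findFrom_natCast_spec s sub 0 (Nat.zero_le _)
        (by rw [h0, hfind]; omega)
      rw [h0, hfind] at hspec
      simpa using hspec.2.1
  · intro hpre
    have hne : PySem.Chars.find s sub ≠ -1 := by
      rw [← h0]
      intro hc
      exact ((PySem.Chars.findFrom_natCast_eq_neg_one_iff s sub 0 (Nat.zero_le _)).mp hc)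
        (by simpa using hpre.isInfix)
    have hspec := PySem.Chars.findFrom_natCast_spec s sub 0 (Nat.zero_le _) (by rw [h0]; exact hne)
    rw [h0] at hspec
    have hge : (0:Int) ≤ PySem.Chars.find s sub := by simpa using hspec.1
    have htn : (PySem.Chars.find s sub).toNat = 0 := by
      by_contra hh
      exact (hspec.2.2 0 (Nat.le_refl 0) (by omega)) (by simpa using hpre)
    have hz : PySem.Chars.find s sub = 0 := by omega
    simp [hz]

lemma pv_innerA_cases (t : List Char) (i : Nat) (acc : List Int) (w : String) :
    (w.toList <+: t.drop i ∧ pvInnerA t i acc w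
        = acc.set (i + w.length) ((acc.getD (i + w.length) 0) + acc.getD i 0))
      ∨ (¬ w.toList <+: t.drop i ∧ pvInnerA t i acc w = acc) := by
  by_cases hpre : w.toList <+: List.drop i t
  · refine Or.inl ⟨hpre, ?_⟩
    simp only [pvInnerA]
    rw [if_pos ((pv_find_zero_iff _ _).mpr hpre)]
  · refine Or.inr ⟨hpre, ?_⟩
    simp only [pvInnerA]
    rw [if_neg (by rw [pv_find_zero_iff]; exact hpre)]

-- A's scan of the bank at position i performs exactly B's pushes at position i
lemma pv_scan_eq (t : List Char) (i : Nat) (bank : List String) :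
    ∀ acc : List Int,
      bank.foldl (pvInnerA t i) acc
        = ((bank.filter (fun w => decide (w.toList <+: t.drop i))).map String.length).foldl
            (pvPushB i) acc := by
  induction bank with
  | nil => intro acc; rfl
  | cons w rest ih =>
    intro acc
    rw [List.foldl_cons, List.filter_cons]
    rcases pv_innerA_cases t i acc w with ⟨hpre, hs⟩ | ⟨hpre, hs⟩
    · rw [hs, if_pos (by simpa using hpre)]
      simp only [List.map_cons, List.foldl_cons]
      rw [ih]
      rfl
    · rw [hs, if_neg (by simpa using hpre)]
      exact ih acc

lemma pv_set_self (l : List Int) (j : Nat) (hj : j < l.length) :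
    l.set j (l.getD j 0) = l := by
  apply List.ext_getElem
  · simp
  · intro k h1 h2
    rw [List.getElem_set]
    split_ifs with h
    · subst h
      rw [List.getD_eq_getElem _ 0 hj]
    · rfl

-- pushing from a zero source is a no-op
lemma pv_push_zero (t : List Char) (i : Nat) (lens : List Nat)
    (hb : ∀ lw ∈ lens, i + lw ≤ t.length) :
    ∀ acc : List Int, acc.length = t.length + 1 → acc.getD i 0 = 0 →
      lens.foldl (pvPushB i) acc = acc := by
  induction lens with
  | nil => intro acc _ _; rfl
  | cons lw rest ih =>
    intro acc hlen hz
    have hlw : i + lw ≤ t.length := hb lw (List.mem_cons_self ..)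
    have hstep : pvPushB i acc lw = acc := by
      unfold pvPushB
      rw [hz, add_zero]
      exact pv_set_self acc (i + lw) (by omega)
    rw [List.foldl_cons, hstep]
    exact ih (fun l h => hb l (List.mem_cons_of_mem _ h)) acc hlen hz

-- length preservation through the scans
lemma pv_lenA (t : List Char) (i : Nat) (bank : List String) :
    ∀ acc : List Int, (bank.foldl (pvInnerA t i) acc).length = acc.length := by
  induction bank with
  | nil => intro acc; rfl
  | cons w rest ih =>
    intro acc
    rw [List.foldl_cons, ih]
    rcases pv_innerA_cases t i acc w with ⟨_, hs⟩ | ⟨_, hs⟩ <;> rw [hs]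
    simp

lemma pv_lenStepA (t : List Char) (bank : List String) (tb : List Int) (i : Nat) :
    (pvStepA t bank tb i).length = tb.length := by
  unfold pvStepA
  split_ifs
  · rw [pv_lenA]
  · rfl

lemma pv_lenOuterA (t : List Char) (bank : List String) (K : Nat) :
    ∀ acc : List Int, ((List.range K).foldl (pvStepA t bank) acc).length = acc.length := by
  induction K with
  | zero => intro acc; rfl
  | succ K ih =>
    intro acc
    rw [List.range_succ, List.foldl_append, List.foldl_cons, List.foldl_nil,
      pv_lenStepA, ih]

-- the two outer loops agree step by step
lemma pv_outer (t : List Char) (bank : List String) (K : Nat) (hK : K ≤ t.length + 1) :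
    ∀ acc : List Int, acc.length = t.length + 1 →
      (List.range K).foldl (pvStepA t bank) acc
        = (List.range K).foldl
            (fun tb i => ((pvBuild t bank).getD i []).foldl (pvPushB i) tb) acc := by
  induction K with
  | zero => intro acc _; rfl
  | succ K ih =>
    intro acc hlen
    obtain ⟨_, hM⟩ := pvBuild_getD t bank
    rw [List.range_succ, List.foldl_append, List.foldl_append,
      List.foldl_cons, List.foldl_cons, List.foldl_nil, List.foldl_nil,
      ← ih (by omega) acc hlen]
    set T := (List.range K).foldl (pvStepA t bank) acc with hT
    have hTlen : T.length = t.length + 1 := by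
      rw [hT]
      exact (pv_lenOuterA t bank K acc).trans hlen
    have hKle : K ≤ t.length := by omega
    rw [hM K hKle]
    unfold pvStepA
    by_cases hz : T.getD K 0 ≠ 0
    · rw [if_pos hz, pv_scan_eq]
    · rw [if_neg hz]
      rw [not_not] at hz
      have hb : ∀ lw ∈ (bank.filter (fun w => decide (w.toList <+: t.drop K))).map String.length,
          K + lw ≤ t.length := by
        intro lw hlw
        simp only [List.mem_map, List.mem_filter, decide_eq_true_eq] at hlw
        obtain ⟨w, ⟨_, hpre⟩, rfl⟩ := hlw
        have h1 := hpre.length_le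
        rw [List.length_drop] at h1
        have h2 : w.toList.length = w.length := String.length_toList
        omega
      exact (pv_push_zero t K _ hb T hTlen hz).symm

-- ===== VERDICT (by name: the statement is the Claim_ definition above) =====
theorem count_construct_tabulated_spec : Claim_equal_count_construct_tabulated := by
  intro tw bank _
  unfold Spec_count_construct_tabulated
  simp only [count_construct_tabulated, count_construct_tabulated_alt, List.length_set,
    List.length_replicate]
  exact pv_outer tw.toList bank (tw.toList.length + 1) (le_refl _) _ (by simp)
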